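-- pv_equiv track=rewrite | github.com/MaxiRobot/Projet_NSI_JeuDesOsselets | calcul colonnes.py | calcul_score_colonne
-- ===== SOURCE A (Python) =====
-- def calcul_score_colonne(des):
--     scores = [0, 0, 0]
--
--     for j in range(3):  # Parcours des colonnes
--         valeurs_colonne = [des[i][j] for i in range(3)]
--         valeurs_uniques = set(valeurs_colonne)
--
--         if len(valeurs_uniques) == 1:  # Si toutes les valeurs sont identiques
--             n = len(valeurs_colonne)
--             v = valeurs_colonne[0]
--             scores[j] = n * n * v
--         elif len(valeurs_uniques) == 3:  # Si toutes les valeurs sont différentes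
--             scores[j] = sum(valeurs_colonne)
--         else:  # Si deux valeurs sont identiques
--             for v in valeurs_uniques:
--                 if valeurs_colonne.count(v) == 2:
--                     valeur_identique = v
--                     break
--             valeurs_differentes = [x for x in valeurs_uniques if x != valeur_identique]
--             valeur_unique = valeurs_differentes[0]
--             n = valeurs_colonne.count(valeur_identique)
--             scores[j] = n * n * valeur_identique + valeur_unique
--
--     return scores
-- ===== SOURCE B (Python) =====
-- def calcul_score_colonne(des):
--     scores = []
--     for j in range(3):
--         freq = {}
--         for i in range(3):
--             v = des[i][j]
--             freq[v] = freq.get(v, 0) + 1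
--         scores.append(sum(c * c * v for v, c in freq.items()))
--     return scores
-- ===== Notes on version B (the rewrite author's own statement) =====
-- stated objective: simpler
-- what changed: Replaces the three-way len(set)/count case analysis (all-equal, all-distinct, pair with an inner search loop) by one uniform closed formula: build a frequency map of the column and score it as sum(count*count*value).
import Mathlib
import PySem

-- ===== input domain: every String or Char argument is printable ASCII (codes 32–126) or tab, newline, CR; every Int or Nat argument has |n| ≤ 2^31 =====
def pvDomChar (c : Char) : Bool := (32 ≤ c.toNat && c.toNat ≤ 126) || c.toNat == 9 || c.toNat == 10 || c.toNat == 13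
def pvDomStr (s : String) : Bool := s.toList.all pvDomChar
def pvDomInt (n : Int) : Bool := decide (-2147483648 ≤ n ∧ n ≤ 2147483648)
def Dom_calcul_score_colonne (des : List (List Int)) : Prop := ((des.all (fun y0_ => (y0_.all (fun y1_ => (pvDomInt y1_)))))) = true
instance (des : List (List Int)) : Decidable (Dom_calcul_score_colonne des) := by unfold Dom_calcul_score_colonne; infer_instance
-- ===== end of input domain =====

-- B replaces A's three-branch len(set)/count case analysis by one closed formula,
-- sum(count*count*value) over a per-column frequency map; return values proved equal on 3x3 grids.

-- ===== PORT A =====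
-- Inside Pre_ every des[i][j] access is in range, so the .getD defaults are never taken
-- (an out-of-range access is an IndexError in Python, excluded by Pre_).
def calcul_score_colonne (des : List (List Int)) : List Int :=
  (PySem.List.pyRange 0 3 1).foldl (fun scores j =>
    let valeurs_colonne := (PySem.List.pyRange 0 3 1).map (fun i =>
      (PySem.List.pyGet? ((PySem.List.pyGet? des i).getD []) j).getD 0)
    let valeurs_uniques := PySem.Set.ofList valeurs_colonne
    let s : Int :=
      if valeurs_uniques.length == 1 then
        let n : Int := valeurs_colonne.length
        let v := ((PySem.List.pyGet? valeurs_colonne 0)).getD 0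
        n * n * v
      else if valeurs_uniques.length == 3 then
        valeurs_colonne.sum
      else
        -- set iteration order is irrelevant here: exactly one value has count 2
        let valeur_identique :=
          (valeurs_uniques.find? (fun v => valeurs_colonne.count v == 2)).getD 0
        let valeurs_differentes := valeurs_uniques.filter (fun x => x != valeur_identique)
        let valeur_unique := ((PySem.List.pyGet? valeurs_differentes 0)).getD 0
        let n : Int := valeurs_colonne.count valeur_identique
        n * n * valeur_identique + valeur_unique
    scores.set j.toNat s) [0, 0, 0]

-- ===== PORT B =====
def calcul_score_colonne_alt (des : List (List Int)) : List Int :=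
  (PySem.List.pyRange 0 3 1).foldl (fun scores j =>
    let freq := (PySem.List.pyRange 0 3 1).foldl (fun d i =>
      let v := (PySem.List.pyGet? ((PySem.List.pyGet? des i).getD []) j).getD 0
      d.modify v 0 (· + 1)) (PySem.Dict.empty : PySem.Dict Int Int)
    scores ++ [(freq.items.map (fun vc => vc.2 * vc.2 * vc.1)).sum]) []

-- ===== PRECONDITION & SPEC =====
-- Pre_ excludes grids without 3 rows of at least 3 entries each, on which A raises IndexError.
def Pre_calcul_score_colonne (des : List (List Int)) : Prop :=
  3 ≤ des.length ∧ ∀ r ∈ des.take 3, 3 ≤ r.length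
instance (des : List (List Int)) : Decidable (Pre_calcul_score_colonne des) := by
  unfold Pre_calcul_score_colonne; infer_instance
def pvWitness_calcul_score_colonne : List (List Int) := [[1, 2, 3], [1, 5, 3], [4, 2, 3]]

def Spec_calcul_score_colonne (des : List (List Int)) (out : List Int) : Prop := out = calcul_score_colonne_alt des
instance (des : List (List Int)) (out : List Int) : Decidable (Spec_calcul_score_colonne des out) := by unfold Spec_calcul_score_colonne; infer_instance

-- ===== CLAIM (what is proved, stated in full; the proofs are below) =====
def Claim_equal_calcul_score_colonne : Prop := ∀ (des : List (List Int)), Dom_calcul_score_colonne des → Pre_calcul_score_colonne des → Spec_calcul_score_colonne des (calcul_score_colonne des)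

-- ===== LEMMAS AND PROOFS =====

-- A's score of one column [a, b, c]
def colA (a b c : Int) : Int :=
  let vc := [a, b, c]
  let u := PySem.Set.ofList vc
  if u.length == 1 then 9 * a
  else if u.length == 3 then vc.sum
  else
    let vi := (u.find? (fun v => vc.count v == 2)).getD 0
    let vu := ((PySem.List.pyGet? (u.filter (fun x => x != vi)) 0)).getD 0
    (vc.count vi : Int) * (vc.count vi) * vi + vu

-- B's score of one column [a, b, c]
def colB (a b c : Int) : Int :=
  (((PySem.Dict.counter [a, b, c]).items).map (fun vc => vc.2 * vc.2 * vc.1)).sum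

theorem colA_eq_colB (a b c : Int) : colA a b c = colB a b c := by
  unfold colA colB
  by_cases hab : a = b <;> by_cases hac : a = c <;> by_cases hbc : b = c <;>
    (try have hba : b ≠ a := Ne.symm hab) <;> (try have hca : c ≠ a := Ne.symm hac) <;>
    (try have hcb : c ≠ b := Ne.symm hbc) <;>
    simp_all [PySem.Set.ofList, PySem.Set.add, PySem.Dict.items_counter, List.count_cons,
      List.filter_nil, bne_iff_ne] <;> ring

theorem get_cons0 {α : Type} (x : α) (t : List α) :
    PySem.List.pyGet? (x :: t) (0:Int) = some x := PySem.List.pyGet?_zero_cons x t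
theorem get_cons1 {α : Type} (x y : α) (t : List α) :
    PySem.List.pyGet? (x :: y :: t) (1:Int) = some y := by
  rw [show (1:Int) = ((1:Nat):Int) by rfl, PySem.List.pyGet?_natCast]; rfl
theorem get_cons2 {α : Type} (x y z : α) (t : List α) :
    PySem.List.pyGet? (x :: y :: z :: t) (2:Int) = some z := by
  rw [show (2:Int) = ((2:Nat):Int) by rfl, PySem.List.pyGet?_natCast]; rfl

theorem portA_eq (a0 b0 c0 a1 b1 c1 a2 b2 c2 : Int) (t0 t1 t2 : List Int) (rest : List (List Int)) :
    calcul_score_colonne ((a0::b0::c0::t0) :: (a1::b1::c1::t1) :: (a2::b2::c2::t2) :: rest)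
      = [colA a0 a1 a2, colA b0 b1 b2, colA c0 c1 c2] := by
  unfold calcul_score_colonne colA
  rw [show PySem.List.pyRange 0 3 1 = [0,1,2] by decide]
  simp only [List.foldl, List.map, get_cons0, get_cons1, get_cons2, Option.getD_some]
  rfl

theorem portB_eq (a0 b0 c0 a1 b1 c1 a2 b2 c2 : Int) (t0 t1 t2 : List Int) (rest : List (List Int)) :
    calcul_score_colonne_alt ((a0::b0::c0::t0) :: (a1::b1::c1::t1) :: (a2::b2::c2::t2) :: rest)
      = [colB a0 a1 a2, colB b0 b1 b2, colB c0 c1 c2] := by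
  unfold calcul_score_colonne_alt colB
  rw [show PySem.List.pyRange 0 3 1 = [0,1,2] by decide]
  simp only [List.foldl, get_cons0, get_cons1, get_cons2, Option.getD_some,
    PySem.Dict.counter_eq_foldl]
  rfl

-- ===== VERDICT (by name: the statement is the Claim_ definition above) =====
theorem calcul_score_colonne_spec : Claim_equal_calcul_score_colonne := by
  intro des _ hpre
  obtain ⟨hlen, hrows⟩ := hpre
  match des, hlen with
  | r0 :: r1 :: r2 :: rest, _ =>
    have h0 : 3 ≤ r0.length := hrows r0 (by simp)
    have h1 : 3 ≤ r1.length := hrows r1 (by simp)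
    have h2 : 3 ≤ r2.length := hrows r2 (by simp)
    match r0, h0 with
    | a0 :: b0 :: c0 :: t0, _ =>
    match r1, h1 with
    | a1 :: b1 :: c1 :: t1, _ =>
    match r2, h2 with
    | a2 :: b2 :: c2 :: t2, _ =>
      show Spec_calcul_score_colonne _ _
      unfold Spec_calcul_score_colonne
      rw [portA_eq, portB_eq, colA_eq_colB, colA_eq_colB, colA_eq_colB]
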